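-- pv_equiv track=rewrite | github.com/DreamFireworks/Codewars-katas | 7_kyu/Turkish Numbers, 0-99/turkish_numbers.py | get_turkish_number
-- ===== SOURCE A (Python) =====
-- def get_turkish_number(x):
--     birler=["","bir","iki","üç","dört","beş","altı","yedi","sekiz","dokuz"]
--     onlar=["","on ","yirmi ","otuz ","kırk ","elli ","altmış ","yetmiş ","seksen ","doksan "]
--     numbers=["sıfır"]
--     for i in onlar:
--         for j in birler:
--             numbers.append((i+j))
--     del numbers[1]
--     return(numbers[x].rstrip())
-- ===== SOURCE B (Python) =====
-- TENS = ["", "on", "yirmi", "otuz", "kırk", "elli", "altmış", "yetmiş", "seksen", "doksan"]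
-- ONES = ["", "bir", "iki", "üç", "dört", "beş", "altı", "yedi", "sekiz", "dokuz"]
--
-- def get_turkish_number(x):
--     n = x % 100
--     if n == 0:
--         return "sıfır"
--     t, o = divmod(n, 10)
--     return " ".join(w for w in (TENS[t], ONES[o]) if w)
-- ===== Notes on version B (the rewrite author's own statement) =====
-- stated objective: simpler
-- what changed: Replaces A's 100-entry table-building double loop (plus rstrip of the looked-up entry) by normalizing x with mod 100, splitting into digits with divmod, and space-joining the nonempty digit words.
import Mathlib
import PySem

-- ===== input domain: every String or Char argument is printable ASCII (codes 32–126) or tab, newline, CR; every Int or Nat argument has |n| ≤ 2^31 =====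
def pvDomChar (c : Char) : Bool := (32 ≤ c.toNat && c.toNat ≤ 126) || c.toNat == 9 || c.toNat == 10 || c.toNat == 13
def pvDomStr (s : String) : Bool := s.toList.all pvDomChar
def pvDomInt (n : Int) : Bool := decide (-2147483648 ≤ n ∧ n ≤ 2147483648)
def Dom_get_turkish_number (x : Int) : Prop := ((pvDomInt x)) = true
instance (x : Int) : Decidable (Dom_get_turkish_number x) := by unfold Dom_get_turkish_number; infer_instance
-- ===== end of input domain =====

-- B replaces A's 100-entry table-building double loop by mod-100 normalization, a divmod
-- digit split and a space-join of the nonempty digit words; equal RETURN value on Pre_.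

-- ===== PORT A =====
def get_turkish_number (x : Int) : String :=
  let birler : List String := ["","bir","iki","üç","dört","beş","altı","yedi","sekiz","dokuz"]
  let onlar : List String := ["","on ","yirmi ","otuz ","kırk ","elli ","altmış ","yetmiş ","seksen ","doksan "]
  let numbers : List String := ["sıfır"]
  let numbers := onlar.foldl (fun acc i => birler.foldl (fun acc2 j => acc2 ++ [i ++ j]) acc) numbers
  let numbers := numbers.eraseIdx 1   -- del numbers[1]
  PySem.Str.rstrip (PySem.List.pyGetD numbers x "")

-- ===== PORT B =====
def pvTENS : List String := ["", "on", "yirmi", "otuz", "kırk", "elli", "altmış", "yetmiş", "seksen", "doksan"]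
def pvONES : List String := ["", "bir", "iki", "üç", "dört", "beş", "altı", "yedi", "sekiz", "dokuz"]

def get_turkish_number_alt (x : Int) : String :=
  let n := PySem.Int.mod x 100
  if n = 0 then "sıfır"
  else
    let t := PySem.Int.floordiv n 10   -- t, o = divmod(n, 10)
    let o := PySem.Int.mod n 10
    String.intercalate " "
      (([PySem.List.pyGetD pvTENS t "", PySem.List.pyGetD pvONES o ""]).filter (fun w => w ≠ ""))

-- ===== PRECONDITION & SPEC =====
-- Exactly the inputs on which A returns: outside -100 ≤ x ≤ 99 the indexing numbers[x] raises IndexError.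
def Pre_get_turkish_number (x : Int) : Prop := -100 ≤ x ∧ x ≤ 99
instance (x : Int) : Decidable (Pre_get_turkish_number x) := by unfold Pre_get_turkish_number; infer_instance
def pvWitness_get_turkish_number : Int := (42)

def Spec_get_turkish_number (x : Int) (out : String) : Prop := out = get_turkish_number_alt x
instance (x : Int) (out : String) : Decidable (Spec_get_turkish_number x out) := by unfold Spec_get_turkish_number; infer_instance

-- ===== CLAIM (what is proved, stated in full; the proofs are below) =====
def Claim_equal_get_turkish_number : Prop := ∀ (x : Int), Dom_get_turkish_number x → Pre_get_turkish_number x → Spec_get_turkish_number x (get_turkish_number x)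

-- ===== LEMMAS AND PROOFS =====
set_option maxRecDepth 100000

theorem gtn_agree : ∀ x ∈ Finset.Icc (-100 : Int) 99,
    get_turkish_number x = get_turkish_number_alt x := by decide

-- ===== VERDICT (by name: the statement is the Claim_ definition above) =====
theorem get_turkish_number_spec : Claim_equal_get_turkish_number := by
  intro x _ hpre
  exact gtn_agree x (Finset.mem_Icc.mpr ⟨hpre.1, hpre.2⟩)
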